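-- pv_equiv track=rewrite | github.com/rchopinw/coding_exercise | permutations.py | prime_number_multiplication_with_duplication
-- ===== SOURCE A (Python) =====
-- def prime_number_multiplication_with_duplication(nums):
--     results = []
--     nums.sort()
--
--     def backtrack(idx, path):
--         if idx == len(nums):
--             return
--         for i in range(idx, len(nums)):
--             if i > idx and nums[i] == nums[i-1]:
--                 continue
--             path.append(nums[i])
--             results.append(path[:])
--             backtrack(i+1, path)
--             path.pop()
--     backtrack(0, [])
--     return results
-- ===== SOURCE B (Python) =====
-- def prime_number_multiplication_with_duplication(nums):
--     nums.sort()
--     results = []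
--     stack = [([], 0)]
--     while stack:
--         path, start = stack.pop()
--         if path:
--             results.append(path)
--         children = []
--         for i in range(start, len(nums)):
--             if i > start and nums[i] == nums[i - 1]:
--                 continue
--             children.append((path + [nums[i]], i + 1))
--         stack.extend(reversed(children))
--     return results
-- ===== Notes on version B (the rewrite author's own statement) =====
-- stated objective: alternative
-- what changed: Replaces A's recursive backtracking (mutable path, append/pop) with an explicit-stack iterative DFS over (path, start) states, pushing children in reverse so pop order reproduces A's pre-order output exactly.
import Mathlib
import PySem

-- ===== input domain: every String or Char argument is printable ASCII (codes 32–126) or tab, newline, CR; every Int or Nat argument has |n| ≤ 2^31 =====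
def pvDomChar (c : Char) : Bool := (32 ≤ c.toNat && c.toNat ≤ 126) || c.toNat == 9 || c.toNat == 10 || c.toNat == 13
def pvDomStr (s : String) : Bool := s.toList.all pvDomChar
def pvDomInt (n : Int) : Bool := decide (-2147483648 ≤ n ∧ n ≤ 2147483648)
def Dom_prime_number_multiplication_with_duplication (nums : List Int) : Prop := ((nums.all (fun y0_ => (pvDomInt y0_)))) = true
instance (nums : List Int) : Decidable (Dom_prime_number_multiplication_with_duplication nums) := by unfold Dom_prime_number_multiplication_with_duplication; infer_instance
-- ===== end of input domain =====

-- B replaces A's recursive backtracking with an explicit-stack iterative DFS (same output, same cost);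
-- both A and B sort `nums` in place — the equivalence proved here is about the return value.

-- ===== PORT A =====
-- A: sort, then recursive backtrack over start index `idx`; the inner `for i in range(idx, len)`
-- loop is `loopA`.  Indices are in range (guarded by `i < length`), so `getD _ 0` is exact here.
mutual
def backA (nums : List Int) (idx : Nat) (path : List Int) : List (List Int) :=
  if idx = nums.length then [] else loopA nums idx idx path
termination_by 2 * (nums.length + 1 - idx) + 1
decreasing_by omega
def loopA (nums : List Int) (idx i : Nat) (path : List Int) : List (List Int) :=
  if _h : i < nums.length then
    if i > idx ∧ nums.getD i 0 = nums.getD (i - 1) 0 then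
      loopA nums idx (i + 1) path
    else
      ((path ++ [nums.getD i 0]) :: backA nums (i + 1) (path ++ [nums.getD i 0]))
        ++ loopA nums idx (i + 1) path
  else []
termination_by 2 * (nums.length + 1 - i)
decreasing_by all_goals omega
end

def prime_number_multiplication_with_duplication (nums : List Int) : List (List Int) :=
  backA (PySem.List.sorted nums (fun x => x) false) 0 []

-- ===== PORT B =====
-- B: sort, then an explicit stack of states (path, start); a pop records path (unless it is the
-- empty root), its children are collected ascending and pushed reversed, so the stack (head = top)
-- becomes `children ++ rest`.  Indices are in range, so `getD _ 0` is exact here.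
def childB (nums : List Int) (path : List Int) (start i : Nat) : List (List Int × Nat) :=
  if _h : i < nums.length then
    (if i > start ∧ nums.getD i 0 = nums.getD (i - 1) 0 then []
     else [(path ++ [nums.getD i 0], i + 1)])
      ++ childB nums path start (i + 1)
  else []
termination_by nums.length - i

-- weight bound needed by runB's termination proof
theorem childB_weight_le (nums : List Int) (path : List Int) (start i : Nat) :
    ((childB nums path start i).map (fun e => 2 ^ (nums.length - e.2))).sum
      ≤ 2 ^ (nums.length - i) - 1 := by
  fun_induction childB nums path start i with
  | case1 i h ih =>
    have hsplit : nums.length - i = (nums.length - (i + 1)) + 1 := by omega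
    have hpos : (0:ℕ) < 2 ^ (nums.length - (i + 1)) := pow_pos (by norm_num) _
    split
    · simpa using le_trans ih (by rw [hsplit, pow_succ]; omega)
    · simp only [List.map_append, List.sum_append, List.map_cons, List.sum_cons,
        List.map_nil, List.sum_nil]
      rw [hsplit, pow_succ]
      omega
  | case2 i h => simp

def runB (nums : List Int) : List (List Int × Nat) → List (List Int)
  | [] => []
  | (path, start) :: rest =>
    (if path ≠ [] then [path] else [])
      ++ runB nums (childB nums path start start ++ rest)
termination_by stack => (stack.map (fun e => 2 ^ (nums.length - e.2))).sum
decreasing_by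
  have h := childB_weight_le nums path start start
  have hpos : (0:ℕ) < 2 ^ (nums.length - start) := pow_pos (by norm_num) _
  simp only [List.map_append, List.sum_append, List.map_cons, List.sum_cons]
  omega

def prime_number_multiplication_with_duplication_alt (nums : List Int) : List (List Int) :=
  runB (PySem.List.sorted nums (fun x => x) false) [([], 0)]

-- ===== PRECONDITION & SPEC =====
def Spec_prime_number_multiplication_with_duplication (nums : List Int) (out : List (List Int)) : Prop := out = prime_number_multiplication_with_duplication_alt nums
instance (nums : List Int) (out : List (List Int)) : Decidable (Spec_prime_number_multiplication_with_duplication nums out) := by unfold Spec_prime_number_multiplication_with_duplication; infer_instance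

-- ===== CLAIM (what is proved, stated in full; the proofs are below) =====
def Claim_equal_prime_number_multiplication_with_duplication : Prop := ∀ (nums : List Int), Dom_prime_number_multiplication_with_duplication nums → Spec_prime_number_multiplication_with_duplication nums (prime_number_multiplication_with_duplication nums)

-- ===== LEMMAS AND PROOFS =====

theorem runB_append (nums : List Int) (s1 s2 : List (List Int × Nat)) :
    runB nums (s1 ++ s2) = runB nums s1 ++ runB nums s2 := by
  fun_induction runB nums s1 with
  | case1 => rfl
  | case2 path start rest ih =>
    simp only [List.cons_append, runB]
    rw [← List.append_assoc, ih, List.append_assoc]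

-- backA is loopA started at idx (the `idx = length` guard is absorbed by loopA's empty loop)
theorem backA_eq_loopA (nums : List Int) (idx : Nat) (path : List Int) :
    backA nums idx path = loopA nums idx idx path := by
  rw [backA]
  split
  · rw [loopA]; simp_all
  · rfl

-- main invariant: running the stack of children from index i yields A's inner loop output
theorem runB_childB (nums : List Int) (path : List Int) (start i : Nat) :
    runB nums (childB nums path start i) = loopA nums start i path := by
  rw [childB, loopA]
  split
  next h =>
    split
    next hc =>
      simpa using runB_childB nums path start (i + 1)
    next hc =>
      rw [List.singleton_append, runB]
      have hne : path ++ [nums.getD i 0] ≠ [] := by simp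
      rw [if_pos hne,
          runB_append nums (childB nums (path ++ [nums.getD i 0]) (i + 1) (i + 1)),
          runB_childB nums (path ++ [nums.getD i 0]) (i + 1) (i + 1),
          ← backA_eq_loopA,
          runB_childB nums path start (i + 1)]
      simp
  next h => rw [runB]
termination_by (nums.length - i, 1)
decreasing_by
  · exact Prod.Lex.left _ _ (by omega)
  · exact Prod.Lex.left _ _ (by omega)
  · exact Prod.Lex.left _ _ (by omega)

-- ===== VERDICT (by name: the statement is the Claim_ definition above) =====
theorem prime_number_multiplication_with_duplication_spec : Claim_equal_prime_number_multiplication_with_duplication := by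
  intro nums _
  unfold Spec_prime_number_multiplication_with_duplication
  unfold prime_number_multiplication_with_duplication prime_number_multiplication_with_duplication_alt
  rw [runB]
  simp only [ne_eq, not_true_eq_false, if_false, List.append_nil, List.nil_append]
  rw [runB_childB, ← backA_eq_loopA]
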